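-- pv_equiv track=rewrite | github.com/jorsaland/pokerpy | pokerpy/structures/_table/_get_split_pot.py | get_split_pot
-- ===== SOURCE A (Python) =====
-- def get_split_pot(total_pot: int, players_amounts: list[int]):
--
--     """
--     Retrieves the pot split into main and side pots.
--     """
--
--     assert total_pot >= sum(amount for amount in players_amounts)
--     splitted_pot: list[int] = []
--
--     if len(set(players_amounts)) == 1:
--         splitted_pot.append(total_pot)
--         return splitted_pot
--
--     min_amount = min(amount for amount in players_amounts)
--     main_pot = 0
--     remaining_amounts: list[int] = []
--
--     for amount in players_amounts:
--         main_pot += min_amount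
--         if amount > min_amount:
--             remaining_amounts.append(amount - min_amount)
--
--     remaining_pot = total_pot - main_pot
--     splitted_pot.extend([main_pot, *get_split_pot(remaining_pot, remaining_amounts)])
--     return splitted_pot
-- ===== SOURCE B (Python) =====
-- def get_split_pot(total_pot: int, players_amounts: list[int]):
--     """
--     Split the pot into main and side pots: sweep the distinct contribution
--     levels in increasing order, each level below the maximum closes a pot of
--     (level increment) * (players still contending); the last pot absorbs the rest.
--     """
--     assert total_pot >= sum(amount for amount in players_amounts)
--     counts = {}
--     for amount in players_amounts:
--         counts[amount] = counts.get(amount, 0) + 1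
--     levels = sorted(counts)
--     splitted_pot = []
--     remaining = len(players_amounts)
--     base = 0
--     paid = 0
--     for level in levels[:-1]:
--         pot = (level - base) * remaining
--         splitted_pot.append(pot)
--         paid += pot
--         base = level
--         remaining -= counts[level]
--     splitted_pot.append(total_pot - paid)
--     return splitted_pot
-- ===== Notes on version B (the rewrite author's own statement) =====
-- stated objective: alternative
-- what changed: A recursively re-scans and rebuilds the amounts list once per distinct contribution level (min, subtract, filter each round); B makes one counting pass, sorts the distinct levels once, and closes one pot per level in a single sweep.
import Mathlib
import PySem

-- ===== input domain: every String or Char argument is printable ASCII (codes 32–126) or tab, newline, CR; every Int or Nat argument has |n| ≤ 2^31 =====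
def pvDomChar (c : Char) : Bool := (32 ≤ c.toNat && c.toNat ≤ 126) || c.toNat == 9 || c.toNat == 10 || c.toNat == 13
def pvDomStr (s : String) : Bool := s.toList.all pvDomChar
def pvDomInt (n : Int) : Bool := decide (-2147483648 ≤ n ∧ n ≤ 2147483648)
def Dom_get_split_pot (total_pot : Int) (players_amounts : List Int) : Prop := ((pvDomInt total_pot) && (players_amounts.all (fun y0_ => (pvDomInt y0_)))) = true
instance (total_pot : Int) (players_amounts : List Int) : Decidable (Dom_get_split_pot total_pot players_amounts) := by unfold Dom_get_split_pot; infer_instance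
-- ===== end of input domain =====

-- B replaces A's repeated min-subtract-and-rebuild recursion by one counting pass plus a sort of
-- the distinct contribution levels, one pot closed per level in a single sweep (objective: alternative).


-- ===== PORT A =====
-- A's per-round 'for amount in players_amounts' loop (accumulate min_amount into main_pot,
-- collect the reduced amounts), as a named helper so the termination argument can cite it.
def foldA (m : Int) (xs : List Int) : Int × List Int :=
  xs.foldl (fun (st : Int × List Int) amount =>
    (st.1 + m, if m < amount then st.2 ++ [amount - m] else st.2)) (0, [])

theorem foldA_aux (m : Int) : ∀ (xs : List Int) (c : Int) (acc : List Int),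
    xs.foldl (fun (st : Int × List Int) amount =>
        (st.1 + m, if m < amount then st.2 ++ [amount - m] else st.2)) (c, acc)
      = (c + m * xs.length, acc ++ (xs.filter (fun a => decide (m < a))).map (fun a => a - m)) := by
  intro xs
  induction xs with
  | nil => intro c acc; simp
  | cons a t ih =>
    intro c acc
    simp only [List.foldl_cons, List.filter_cons, List.length_cons]
    by_cases h : m < a
    · rw [if_pos h, ih]
      simp [h]
      ring
    · rw [if_neg h, ih]
      simp [h]
      ring

theorem foldA_eq (m : Int) (xs : List Int) :
    foldA m xs = (m * xs.length, (xs.filter (fun a => decide (m < a))).map (fun a => a - m)) := by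
  rw [foldA, foldA_aux]
  simp

theorem remaining_lt (xs : List Int) (m : Int) (hm : PySem.List.min? xs (fun x => x) = some m) :
    (foldA m xs).2.length < xs.length := by
  have hmem : m ∈ xs := PySem.List.min?_mem hm
  rw [foldA_eq]
  simp only [List.length_map]
  exact List.length_filter_lt_length_iff_exists.mpr ⟨m, hmem, by simp⟩

def get_split_pot (total_pot : Int) (players_amounts : List Int) : List Int :=
  -- assert total_pot >= sum(...): an AssertionError is outside Pre_
  if total_pot < players_amounts.sum then []
  else if (PySem.Set.ofList players_amounts).length = 1 then [total_pot]
  else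
    match hm : PySem.List.min? players_amounts (fun x => x) with
    | none => []  -- min() of an empty sequence raises ValueError: outside Pre_
    | some min_amount =>
      let st := foldA min_amount players_amounts
      st.1 :: get_split_pot (total_pot - st.1) st.2
termination_by players_amounts.length
decreasing_by
  exact remaining_lt _ _ hm

-- ===== PORT B =====
-- the body of Source B's 'for level in levels[:-1]' loop; state = (splitted_pot, remaining, base, paid)
def stepB (cnt : Int → Int) (st : List Int × Int × Int × Int) (level : Int) : List Int × Int × Int × Int :=
  let pot := (level - st.2.2.1) * st.2.1
  (st.1 ++ [pot], st.2.1 - cnt level, level, st.2.2.2 + pot)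

def get_split_pot_alt (total_pot : Int) (players_amounts : List Int) : List Int :=
  -- assert total_pot >= sum(...): an AssertionError is outside Pre_
  if total_pot < players_amounts.sum then []
  else
  let counts := players_amounts.foldl
    (fun (d : PySem.Dict Int Int) amount => d.insert amount (d.getD amount 0 + 1)) PySem.Dict.empty
  let levels := PySem.List.sorted counts.keys (fun x => x) false
  let st := (PySem.List.slice levels none (some (-1))).foldl
    (stepB (fun level => counts.getD level 0)) ([], (players_amounts.length : Int), 0, 0)
  st.1 ++ [total_pot - st.2.2.2]

-- ===== PRECONDITION & SPEC =====
-- Pre_ excludes exactly the inputs where A raises: an empty players_amounts (min() raises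
-- ValueError) and total_pot < sum(players_amounts) (the assert raises AssertionError).
def Pre_get_split_pot (total_pot : Int) (players_amounts : List Int) : Prop :=
  players_amounts ≠ [] ∧ players_amounts.sum ≤ total_pot
instance (total_pot : Int) (players_amounts : List Int) : Decidable (Pre_get_split_pot total_pot players_amounts) := by unfold Pre_get_split_pot; infer_instance

def pvWitness_get_split_pot : Int × List Int := (10, [1, 2, 3])

def Spec_get_split_pot (total_pot : Int) (players_amounts : List Int) (out : List Int) : Prop := out = get_split_pot_alt total_pot players_amounts
instance (total_pot : Int) (players_amounts : List Int) (out : List Int) : Decidable (Spec_get_split_pot total_pot players_amounts out) := by unfold Spec_get_split_pot; infer_instance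

-- ===== CLAIM (what is proved, stated in full; the proofs are below) =====
def Claim_equal_get_split_pot : Prop := ∀ (total_pot : Int) (players_amounts : List Int), Dom_get_split_pot total_pot players_amounts → Pre_get_split_pot total_pot players_amounts → Spec_get_split_pot total_pot players_amounts (get_split_pot total_pot players_amounts)

-- ===== LEMMAS AND PROOFS =====

-- frame lemma: B's pot loop only appends to splitted_pot and adds to paid
theorem foldB_frame (cnt : Int → Int) : ∀ (ls : List Int) (p0 : List Int) (rem base c0 : Int),
    ls.foldl (stepB cnt) (p0, rem, base, c0)
      = ((p0 ++ (ls.foldl (stepB cnt) ([], rem, base, 0)).1,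
          (ls.foldl (stepB cnt) ([], rem, base, 0)).2.1,
          (ls.foldl (stepB cnt) ([], rem, base, 0)).2.2.1,
          c0 + (ls.foldl (stepB cnt) ([], rem, base, 0)).2.2.2)) := by
  intro ls
  induction ls with
  | nil => intro p0 rem base c0; simp
  | cons lv t ih =>
    intro p0 rem base c0
    simp only [List.foldl_cons, stepB, List.nil_append, zero_add]
    rw [ih (p0 ++ [(lv - base) * rem]), ih [(lv - base) * rem]]
    simp only [List.append_assoc, Prod.mk.injEq, List.append_cancel_left_eq, true_and]
    ring

-- shift lemma: running the loop on levels shifted down by m (with the shifted counts and a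
-- shifted base) produces the same pots, remaining and paid, and a shifted base.
theorem foldB_shift (m : Int) (cntO cntI : Int → Int) :
    ∀ (ls : List Int), (∀ lv ∈ ls, cntI (lv - m) = cntO lv) →
    ∀ (p : List Int) (rem base c : Int),
    (ls.map (fun lv => lv - m)).foldl (stepB cntI) (p, rem, base - m, c)
      = ((ls.foldl (stepB cntO) (p, rem, base, c)).1,
         (ls.foldl (stepB cntO) (p, rem, base, c)).2.1,
         (ls.foldl (stepB cntO) (p, rem, base, c)).2.2.1 - m,
         (ls.foldl (stepB cntO) (p, rem, base, c)).2.2.2) := by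
  intro ls
  induction ls with
  | nil => intro _ p rem base c; simp
  | cons lv t ih =>
    intro h p rem base c
    simp only [List.map_cons, List.foldl_cons, stepB]
    have h1 : cntI (lv - m) = cntO lv := h lv (by simp)
    have harith : (lv - m - (base - m)) * rem = (lv - base) * rem := by ring
    rw [harith, h1]
    exact ih (fun x hx => h x (by simp [hx])) (p ++ [(lv - base) * rem]) (rem - cntO lv) lv
      (c + (lv - base) * rem)

theorem sum_remaining (m : Int) : ∀ (xs : List Int), (∀ a ∈ xs, m ≤ a) →
    ((xs.filter (fun a => decide (m < a))).map (fun a => a - m)).sum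
      = xs.sum - m * xs.length := by
  intro xs
  induction xs with
  | nil => intro _; simp
  | cons a t ih =>
    intro h
    have ha : m ≤ a := h a (by simp)
    have ht := ih (fun x hx => h x (by simp [hx]))
    by_cases hlt : m < a
    · simp [hlt, ht]
      ring
    · have hae : a = m := le_antisymm (not_lt.mp hlt) ha
      simp [ht, hae]
      ring

theorem length_remaining (m : Int) : ∀ (xs : List Int), (∀ a ∈ xs, m ≤ a) →
    (xs.filter (fun a => decide (m < a))).length = xs.length - xs.count m := by
  intro xs
  induction xs with
  | nil => intro _; simp
  | cons a t ih =>
    intro h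
    have ha : m ≤ a := h a (by simp)
    have ht := ih (fun x hx => h x (by simp [hx]))
    have hcle : t.count m ≤ t.length := List.count_le_length
    by_cases hlt : m < a
    · have hne : (a == m) = false := by simp; omega
      simp [List.count_cons, hlt, ht, hne]
      omega
    · have hae : a = m := le_antisymm (not_lt.mp hlt) ha
      simp [List.count_cons, hlt, ht, hae]

theorem keys_of_counts_fold (xs : List Int) :
    (xs.foldl (fun (d : PySem.Dict Int Int) a => d.insert a (d.getD a 0 + 1)) PySem.Dict.empty).keys
      = PySem.Set.ofList xs := by
  rw [PySem.Dict.keys_foldl_insert]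
  simp [PySem.Dict.keys_empty, PySem.Set.update, PySem.Set.ofList_eq_foldl]

theorem getD_of_counts_fold (xs : List Int) (v : Int) :
    (xs.foldl (fun (d : PySem.Dict Int Int) a => d.insert a (d.getD a 0 + 1)) PySem.Dict.empty).getD v 0
      = xs.count v := by
  rw [PySem.Dict.getD_foldl_insert_add_one xs PySem.Dict.empty v]
  simp

-- the sorted distinct levels of the reduced amounts are the tail levels shifted down by m
theorem levels_remaining (xs : List Int) (m : Int) (L : List Int)
    (hlv : PySem.List.sorted (PySem.Set.ofList xs) (fun x => x) false = m :: L)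
    (_hmin : ∀ a ∈ xs, m ≤ a) :
    PySem.List.sorted
      (PySem.Set.ofList ((xs.filter (fun a => decide (m < a))).map (fun a => a - m)))
      (fun x => x) false = L.map (fun lv => lv - m) := by
  have hpw : (m :: L).Pairwise (· < ·) := by
    rw [← hlv]; exact PySem.List.sorted_ofList_pairwise_lt xs
  have hLpw : L.Pairwise (· < ·) := (List.pairwise_cons.mp hpw).2
  have hmLt : ∀ lv ∈ L, m < lv := (List.pairwise_cons.mp hpw).1
  have hLnd : L.Nodup := hLpw.imp (fun h => ne_of_lt h)
  have hmemlv : ∀ a, a ∈ (m :: L) ↔ a ∈ xs := by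
    intro a
    rw [← hlv, PySem.List.mem_sorted, PySem.Set.mem_ofList]
  apply PySem.List.sorted_eq_of_perm_of_pairwise_lt
  · -- permutation
    rw [List.perm_ext_iff_of_nodup]
    · intro y
      rw [PySem.Set.mem_ofList]
      simp only [List.mem_map, List.mem_filter, decide_eq_true_eq]
      constructor
      · rintro ⟨lv, hlvL, rfl⟩
        exact ⟨lv, ⟨(hmemlv lv).mp (by simp [hlvL]), hmLt lv hlvL⟩, rfl⟩
      · rintro ⟨a, ⟨hax, hma⟩, rfl⟩
        refine ⟨a, ?_, rfl⟩
        have : a ∈ m :: L := (hmemlv a).mpr hax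
        rcases List.mem_cons.mp this with h | h
        · omega
        · exact h
    · exact hLnd.map (fun x y h => by omega)
    · exact PySem.Set.nodup_ofList _
  · -- strictly increasing
    exact List.pairwise_map.mpr (hLpw.imp (fun h => by omega))

-- main equivalence, by strong induction on the number of players
theorem main_equiv : ∀ (n : Nat) (total_pot : Int) (xs : List Int), xs.length ≤ n →
    xs ≠ [] → xs.sum ≤ total_pot →
    get_split_pot total_pot xs = get_split_pot_alt total_pot xs := by
  intro n
  induction n with
  | zero => intro t xs hlen hne _; exact absurd (List.length_eq_zero_iff.mp (Nat.le_zero.mp hlen)) hne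
  | succ n ih =>
    intro t xs hlen hne hsum
    have hkeys := keys_of_counts_fold xs
    have hgetD := getD_of_counts_fold xs
    rw [get_split_pot, get_split_pot_alt]
    rw [if_neg (show ¬(t < xs.sum) by omega), if_neg (show ¬(t < xs.sum) by omega)]
    simp only [hkeys, hgetD]
    by_cases h1 : (PySem.Set.ofList xs).length = 1
    · -- all amounts equal: A returns [total_pot]; B's levels[:-1] is empty
      rw [if_pos h1]
      obtain ⟨a, ha⟩ : ∃ a, PySem.Set.ofList xs = [a] := by
        match hS : PySem.Set.ofList xs with
        | [a] => exact ⟨a, rfl⟩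
        | [] => rw [hS] at h1; simp at h1
        | x :: y :: r => rw [hS] at h1; simp at h1
      rw [ha]
      have hsorted : PySem.List.sorted [a] (fun x : Int => x) false = [a] :=
        PySem.List.sorted_eq_self_of_pairwise [a] (fun x : Int => x) (by simp)
      rw [hsorted, PySem.List.slice_to_neg_one]
      simp
    · rw [if_neg h1]
      obtain ⟨m, hm⟩ : ∃ m, PySem.List.min? xs (fun x => x) = some m := by
        cases hmm : PySem.List.min? xs (fun x => x) with
        | none => exact absurd ((PySem.List.min?_eq_none_iff xs _).mp hmm) hne
        | some m => exact ⟨m, rfl⟩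
      rw [hm]
      have hmmem : m ∈ xs := PySem.List.min?_mem hm
      have hmin : ∀ a ∈ xs, m ≤ a := fun a ha => PySem.List.min?_isMin hm a ha
      simp only [foldA_eq]
      set rem : List Int := (xs.filter (fun a => decide (m < a))).map (fun a => a - m) with hrem
      set lv : List Int := PySem.List.sorted (PySem.Set.ofList xs) (fun x : Int => x) false with hlvdef
      have hlv_perm : lv.Perm (PySem.Set.ofList xs) := PySem.List.sorted_perm _ _ _
      have hlv_ne : lv ≠ [] := by
        intro hnil
        have : m ∈ PySem.Set.ofList xs := (PySem.Set.mem_ofList _ _).mpr hmmem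
        rw [← hlv_perm.mem_iff, hnil] at this
        cases this
      obtain ⟨lv0, L, hL⟩ : ∃ lv0 L, lv = lv0 :: L := by
        cases hlvc : lv with
        | nil => exact absurd hlvc hlv_ne
        | cons a b => exact ⟨a, b, rfl⟩
      have hlv0 : lv0 = m := by
        have hle : ∀ y ∈ xs, lv0 ≤ y := by
          intro y hy
          have := PySem.List.key_head_sorted_le (xs := PySem.Set.ofList xs)
            (key := fun x : Int => x) (by rw [← hlvdef, hL])
          exact this y ((PySem.Set.mem_ofList _ _).mpr hy)
        have h2 : lv0 ∈ xs := by
          have : lv0 ∈ lv := by simp [hL]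
          exact (PySem.Set.mem_ofList _ _).mp (hlv_perm.mem_iff.mp this)
        exact le_antisymm (hle m hmmem) (hmin lv0 h2)
      rw [hlv0] at hL
      have hLne : L ≠ [] := by
        intro hnil
        rw [hnil] at hL
        have := hlv_perm.length_eq
        rw [hL] at this
        exact h1 this.symm
      rw [hL, PySem.List.slice_to_neg_one, List.dropLast_cons_of_ne_nil hLne]
      have hpw : (m :: L).Pairwise (· < ·) := by
        rw [← hL, hlvdef]; exact PySem.List.sorted_ofList_pairwise_lt xs
      have hmLt : ∀ x ∈ L, m < x := (List.pairwise_cons.mp hpw).1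
      have hrem_ne : rem ≠ [] := by
        obtain ⟨l1, hl1⟩ : ∃ l1, l1 ∈ L := by
          cases L with
          | nil => exact absurd rfl hLne
          | cons a b => exact ⟨a, by simp⟩
        have hl1x : l1 ∈ xs := by
          have : l1 ∈ lv := by simp [hL, hl1]
          exact (PySem.Set.mem_ofList _ _).mp (hlv_perm.mem_iff.mp this)
        intro hnil
        have : l1 - m ∈ rem := by
          rw [hrem]
          exact List.mem_map.mpr ⟨l1, List.mem_filter.mpr ⟨hl1x, by simp [hmLt l1 hl1]⟩, rfl⟩
        rw [hnil] at this
        cases this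
      have hrem_sum : rem.sum = xs.sum - m * xs.length := sum_remaining m xs hmin
      have hrem_len : rem.length = xs.length - xs.count m := by
        rw [hrem, List.length_map]; exact length_remaining m xs hmin
      have hrem_lt : rem.length < xs.length := by
        rw [hrem_len]
        have h1 : 1 ≤ xs.count m := List.one_le_count_iff.mpr hmmem
        have h2 : xs.length ≠ 0 := by
          intro h0; exact hne (List.length_eq_zero_iff.mp h0)
        omega
      have hihres := ih (t - m * xs.length) rem (by omega) hrem_ne (by rw [hrem_sum]; omega)
      rw [hihres]
      -- unfold B on the recursive call
      rw [get_split_pot_alt]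
      rw [if_neg (by rw [hrem_sum]; omega)]
      simp only [keys_of_counts_fold, getD_of_counts_fold]
      have hlevels := levels_remaining xs m L (by rw [← hlvdef, hL]) hmin
      rw [← hrem] at hlevels
      rw [hlevels]
      have hmapdl : (L.map (fun lv => lv - m)).dropLast = L.dropLast.map (fun lv => lv - m) :=
        List.map_dropLast.symm
      rw [PySem.List.slice_to_neg_one, hmapdl]
      -- counts correspondence on L.dropLast
      have hcnt : ∀ x ∈ L.dropLast, ((rem.count (x - m) : Int)) = ((xs.count x : Int)) := by
        intro x hx
        have hxL : x ∈ L := List.dropLast_subset _ hx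
        have hmx : m < x := hmLt x hxL
        rw [hrem]
        have hinj : Function.Injective (fun a : Int => a - m) := fun a b hab => by simpa using hab
        have hc1 : List.count (x - m) (List.map (fun a => a - m) (List.filter (fun a => decide (m < a)) xs))
            = List.count x (List.filter (fun a => decide (m < a)) xs) :=
          List.count_map_of_injective _ (fun a => a - m) hinj x
        rw [hc1, List.count_filter (by simp [hmx])]
      have hlen_rem_int : (rem.length : Int) = (xs.length : Int) - (xs.count m : Int) := by
        have hc : xs.count m ≤ xs.length := List.count_le_length
        rw [hrem_len]
        omega
      rw [hlen_rem_int]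
      -- the first loop iteration of the outer B
      rw [List.foldl_cons]
      simp only [stepB, List.nil_append, zero_add, sub_zero]
      -- outer fold via the frame lemma
      rw [foldB_frame]
      -- inner fold via the shift lemma
      have hshift : (L.dropLast.map (fun lv => lv - m)).foldl
            (stepB (fun level => (rem.count level : Int)))
            ([], (xs.length : Int) - (xs.count m : Int), 0, 0)
          = ((L.dropLast.foldl (stepB (fun level => (xs.count level : Int)))
                ([], (xs.length : Int) - (xs.count m : Int), m, 0)).1,
             (L.dropLast.foldl (stepB (fun level => (xs.count level : Int)))
                ([], (xs.length : Int) - (xs.count m : Int), m, 0)).2.1,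
             (L.dropLast.foldl (stepB (fun level => (xs.count level : Int)))
                ([], (xs.length : Int) - (xs.count m : Int), m, 0)).2.2.1 - m,
             (L.dropLast.foldl (stepB (fun level => (xs.count level : Int)))
                ([], (xs.length : Int) - (xs.count m : Int), m, 0)).2.2.2) := by
        have := foldB_shift m (fun level => (xs.count level : Int))
          (fun level => (rem.count level : Int)) L.dropLast hcnt []
          ((xs.length : Int) - (xs.count m : Int)) m 0
        simpa only [sub_self] using this
      rw [hshift]
      rw [foldB_frame _ L.dropLast [m * (xs.length : Int)]]
      simp only [zero_add, List.cons_append, List.nil_append, List.append_assoc, sub_sub]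

-- ===== VERDICT (by name: the statement is the Claim_ definition above) =====
theorem get_split_pot_spec : Claim_equal_get_split_pot := by
  intro t xs _ hpre
  unfold Spec_get_split_pot
  exact main_equiv xs.length t xs le_rfl hpre.1 hpre.2
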